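-- pv_equiv track=rewrite | github.com/aygp-dr/values-compass | scripts/anti_value_clusters.py | find_common_themes
-- ===== SOURCE A (Python) =====
-- def find_common_themes(values):
--     """Identify common themes in a list of anti-values."""
--     themes = []
--
--     # Define theme categories for anti-values
--     categories = {
--         "dishonesty": ["misinformation", "dishonesty", "deception", "falsehood", "manipulation"],
--         "harm": ["harmfulness", "hostility", "aggression", "callousness"],
--         "incompetence": ["incompetence", "carelessness", "negligence", "confusion", "incomprehensibility"],
--         "bias": ["bias", "prejudice", "partisanship", "subjectivity"],
--         "disrespect": ["rudeness", "disrespect", "disrespectfulness", "condescension"],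
--         "irresponsibility": ["irresponsibility", "recklessness", "unreliability", "instability"],
--         "obstruction": ["hindrance", "obstruction", "evasiveness"],
--         "intolerance": ["intolerance", "dogmatism", "rigidity"],
--         "arrogance": ["arrogance", "cynicism"],
--         "opacity": ["secrecy", "ambiguity", "vagueness"]
--     }
--
--     # Check for theme matches
--     for theme, keywords in categories.items():
--         if any(value in keywords for value in values):
--             themes.append(theme)
--
--     return themes or ["mixed negative traits"]
-- ===== SOURCE B (Python) =====
-- # Hard-coded inverted table: each anti-value keyword maps directly to its theme.
-- KEYWORD_THEME = {
--     "misinformation": "dishonesty",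
--     "dishonesty": "dishonesty",
--     "deception": "dishonesty",
--     "falsehood": "dishonesty",
--     "manipulation": "dishonesty",
--     "harmfulness": "harm",
--     "hostility": "harm",
--     "aggression": "harm",
--     "callousness": "harm",
--     "incompetence": "incompetence",
--     "carelessness": "incompetence",
--     "negligence": "incompetence",
--     "confusion": "incompetence",
--     "incomprehensibility": "incompetence",
--     "bias": "bias",
--     "prejudice": "bias",
--     "partisanship": "bias",
--     "subjectivity": "bias",
--     "rudeness": "disrespect",
--     "disrespect": "disrespect",
--     "disrespectfulness": "disrespect",
--     "condescension": "disrespect",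
--     "irresponsibility": "irresponsibility",
--     "recklessness": "irresponsibility",
--     "unreliability": "irresponsibility",
--     "instability": "irresponsibility",
--     "hindrance": "obstruction",
--     "obstruction": "obstruction",
--     "evasiveness": "obstruction",
--     "intolerance": "intolerance",
--     "dogmatism": "intolerance",
--     "rigidity": "intolerance",
--     "arrogance": "arrogance",
--     "cynicism": "arrogance",
--     "secrecy": "opacity",
--     "ambiguity": "opacity",
--     "vagueness": "opacity",
-- }
--
-- # Theme emission order (the declaration order of the original categories).
-- THEMES = ["dishonesty", "harm", "incompetence", "bias", "disrespect",
--           "irresponsibility", "obstruction", "intolerance", "arrogance", "opacity"]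
--
--
-- def find_common_themes(values):
--     """Identify common themes in a list of anti-values."""
--     matched = {KEYWORD_THEME[v] for v in values if v in KEYWORD_THEME}
--     themes = [t for t in THEMES if t in matched]
--     return themes or ["mixed negative traits"]
-- ===== Notes on version B (the rewrite author's own statement) =====
-- stated objective: faster
-- what changed: Replaces the per-theme scan of the whole values list with a hard-coded inverted keyword->theme dictionary, a single set-comprehension pass over the values collecting matched themes, and emission of themes in declaration order.
import Mathlib
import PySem

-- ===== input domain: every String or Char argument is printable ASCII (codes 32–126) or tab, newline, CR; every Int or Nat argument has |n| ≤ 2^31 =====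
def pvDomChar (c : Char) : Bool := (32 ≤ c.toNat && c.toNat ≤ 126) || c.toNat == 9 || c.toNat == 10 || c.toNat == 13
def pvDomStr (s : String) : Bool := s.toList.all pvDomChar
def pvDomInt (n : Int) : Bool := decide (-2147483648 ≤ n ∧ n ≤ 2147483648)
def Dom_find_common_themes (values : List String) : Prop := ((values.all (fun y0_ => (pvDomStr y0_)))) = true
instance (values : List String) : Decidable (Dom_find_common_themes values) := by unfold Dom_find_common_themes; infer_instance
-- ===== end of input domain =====

-- B replaces A's per-theme scan of the values list by a hard-coded inverted keyword->theme
-- dictionary, one pass over the values collecting matched themes into a set, and emission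
-- in theme declaration order (faster by a constant-factor mechanism: one lookup per value).

-- ===== PORT A =====
-- A's category table, defined inside the Python function
def pvCategories : List (String × List String) :=
  [ ("dishonesty", ["misinformation", "dishonesty", "deception", "falsehood", "manipulation"]),
    ("harm", ["harmfulness", "hostility", "aggression", "callousness"]),
    ("incompetence", ["incompetence", "carelessness", "negligence", "confusion", "incomprehensibility"]),
    ("bias", ["bias", "prejudice", "partisanship", "subjectivity"]),
    ("disrespect", ["rudeness", "disrespect", "disrespectfulness", "condescension"]),
    ("irresponsibility", ["irresponsibility", "recklessness", "unreliability", "instability"]),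
    ("obstruction", ["hindrance", "obstruction", "evasiveness"]),
    ("intolerance", ["intolerance", "dogmatism", "rigidity"]),
    ("arrogance", ["arrogance", "cynicism"]),
    ("opacity", ["secrecy", "ambiguity", "vagueness"]) ]

-- for theme, keywords in categories.items(): if any(value in keywords for value in values): themes.append(theme)
def find_common_themes (values : List String) : List String :=
  let themes : List String :=
    pvCategories.foldl
      (fun themes p =>
        if values.any (fun value => p.2.contains value) then themes ++ [p.1] else themes)
      []
  if themes = [] then ["mixed negative traits"] else themes

-- ===== PORT B =====
-- KEYWORD_THEME: the hard-coded inverted dictionary of Source B, keyword -> theme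
def pvKeywordTheme : PySem.Dict String String := PySem.Dict.mk
  [ ("misinformation", "dishonesty"),
    ("dishonesty", "dishonesty"),
    ("deception", "dishonesty"),
    ("falsehood", "dishonesty"),
    ("manipulation", "dishonesty"),
    ("harmfulness", "harm"),
    ("hostility", "harm"),
    ("aggression", "harm"),
    ("callousness", "harm"),
    ("incompetence", "incompetence"),
    ("carelessness", "incompetence"),
    ("negligence", "incompetence"),
    ("confusion", "incompetence"),
    ("incomprehensibility", "incompetence"),
    ("bias", "bias"),
    ("prejudice", "bias"),
    ("partisanship", "bias"),
    ("subjectivity", "bias"),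
    ("rudeness", "disrespect"),
    ("disrespect", "disrespect"),
    ("disrespectfulness", "disrespect"),
    ("condescension", "disrespect"),
    ("irresponsibility", "irresponsibility"),
    ("recklessness", "irresponsibility"),
    ("unreliability", "irresponsibility"),
    ("instability", "irresponsibility"),
    ("hindrance", "obstruction"),
    ("obstruction", "obstruction"),
    ("evasiveness", "obstruction"),
    ("intolerance", "intolerance"),
    ("dogmatism", "intolerance"),
    ("rigidity", "intolerance"),
    ("arrogance", "arrogance"),
    ("cynicism", "arrogance"),
    ("secrecy", "opacity"),
    ("ambiguity", "opacity"),
    ("vagueness", "opacity") ]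

-- THEMES: the emission order of Source B
def pvThemes : List String :=
  ["dishonesty", "harm", "incompetence", "bias", "disrespect",
   "irresponsibility", "obstruction", "intolerance", "arrogance", "opacity"]

-- matched = {KEYWORD_THEME[v] for v in values if v in KEYWORD_THEME}
-- themes  = [t for t in THEMES if t in matched]; return themes or ["mixed negative traits"]
def find_common_themes_alt (values : List String) : List String :=
  let matched : PySem.Set String :=
    PySem.Set.ofList (values.filterMap (fun v => pvKeywordTheme.get? v))
  match pvThemes.filter (fun t => PySem.Set.contains matched t) with
  | [] => ["mixed negative traits"]
  | themes => themes

-- ===== PRECONDITION & SPEC =====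
def Spec_find_common_themes (values : List String) (out : List String) : Prop := out = find_common_themes_alt values
instance (values : List String) (out : List String) : Decidable (Spec_find_common_themes values out) := by unfold Spec_find_common_themes; infer_instance

-- ===== CLAIM (what is proved, stated in full; the proofs are below) =====
def Claim_equal_find_common_themes : Prop := ∀ (values : List String), Dom_find_common_themes values → Spec_find_common_themes values (find_common_themes values)

-- ===== LEMMAS AND PROOFS =====

set_option maxRecDepth 8192 in
lemma pvKeywordTheme_keys_nodup : pvKeywordTheme.keys.Nodup := by decide

-- keyword membership in a category's list coincides with lookup in B's inverted dictionary
lemma mem_keywords_iff (p : String × List String) (hp : p ∈ pvCategories) (v : String) :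
    v ∈ p.2 ↔ pvKeywordTheme.get? v = some p.1 := by
  rw [PySem.Dict.get?_eq_some_iff_mem_items pvKeywordTheme v p.1 pvKeywordTheme_keys_nodup]
  fin_cases hp <;> (simp [pvKeywordTheme]; try tauto)

-- membership in B's matched set: some value looks up to this theme
lemma mem_matched (values : List String) (t : String) :
    t ∈ PySem.Set.ofList (values.filterMap (fun v => pvKeywordTheme.get? v))
      ↔ ∃ v ∈ values, pvKeywordTheme.get? v = some t := by
  rw [PySem.Set.mem_ofList, List.mem_filterMap]

-- the two per-theme conditions coincide for every category entry
lemma cond_eq (values : List String) (p : String × List String) (hp : p ∈ pvCategories) :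
    values.any (fun value => p.2.contains value)
      = PySem.Set.contains (PySem.Set.ofList (values.filterMap (fun v => pvKeywordTheme.get? v))) p.1 := by
  rw [Bool.eq_iff_iff, List.any_eq_true,
    show (PySem.Set.contains (PySem.Set.ofList (values.filterMap (fun v => pvKeywordTheme.get? v))) p.1 = true)
        ↔ p.1 ∈ PySem.Set.ofList (values.filterMap (fun v => pvKeywordTheme.get? v)) from
      PySem.Set.contains_iff _ _,
    mem_matched]
  refine exists_congr fun v => and_congr_right fun _ => ?_
  rw [← mem_keywords_iff p hp v, List.contains_iff_mem]

-- pvThemes is the key list of A's table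
lemma pvThemes_eq : pvThemes = pvCategories.map Prod.fst := by decide

-- A's accumulation loop computes B's filtered theme list
lemma themes_eq (values : List String) :
    pvCategories.foldl
      (fun themes p =>
        if values.any (fun value => p.2.contains value) then themes ++ [p.1] else themes) []
    = pvThemes.filter
        (fun t => PySem.Set.contains (PySem.Set.ofList (values.filterMap (fun v => pvKeywordTheme.get? v))) t) := by
  rw [PySem.List.foldl_append_if]
  simp only [List.nil_append]
  rw [pvThemes_eq, List.filter_map]
  congr 1
  exact List.filter_congr (fun p hp => cond_eq values p hp)

-- ===== VERDICT (by name: the statement is the Claim_ definition above) =====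
theorem find_common_themes_spec : Claim_equal_find_common_themes := by
  intro values _
  unfold Spec_find_common_themes find_common_themes find_common_themes_alt
  simp only [themes_eq values]
  cases h : pvThemes.filter
      (fun t => PySem.Set.contains (PySem.Set.ofList (values.filterMap (fun v => pvKeywordTheme.get? v))) t) with
  | nil => simp
  | cons a l => simp
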